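-- pv_equiv track=rewrite | github.com/Yevhen-Yezerskyy/flexx-app | web/flexx/pdf_tippgeber_contract.py | _consume_prefix_chars
-- ===== SOURCE A (Python) =====
-- def _consume_prefix_chars(entries: list[tuple[str, str, bool, bool, bool]], char_count: int) -> list[tuple[str, str, bool, bool, bool]]:
--     remain = max(char_count, 0)
--     out: list[tuple[str, str, bool, bool, bool]] = []
--     for token_type, token_value, token_bold, token_underlined, token_raw in entries:
--         if remain <= 0:
--             out.append((token_type, token_value, token_bold, token_underlined, token_raw))
--             continue
--         token_len = 1 if token_type == "tab" else len(token_value)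
--         if remain >= token_len:
--             remain -= token_len
--             continue
--         if token_type == "tab":
--             out.append((token_type, token_value, token_bold, token_underlined, token_raw))
--         else:
--             out.append((token_type, token_value[remain:], token_bold, token_underlined, token_raw))
--         remain = 0
--     return out
-- ===== SOURCE B (Python) =====
-- def _consume_prefix_chars(entries: list[tuple[str, str, bool, bool, bool]], char_count: int) -> list[tuple[str, str, bool, bool, bool]]:
--     # Work from the BACK: compute the total token length once, then keep the last
--     # (total - char_count) characters by walking the entries in reverse, slicing
--     # the boundary token from its end.
--     drop = max(char_count, 0)
--     total = sum(1 if t == "tab" else len(v) for t, v, _b, _u, _r in entries)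
--     keep = total - drop
--     out = []
--     acc = 0
--     for e in reversed(entries):
--         t, v = e[0], e[1]
--         token_len = 1 if t == "tab" else len(v)
--         if acc + token_len <= keep:
--             out.append(e)
--             acc += token_len
--         else:
--             need = keep - acc
--             if need > 0:
--                 out.append((t, v[token_len - need:], e[2], e[3], e[4]))
--             break
--     out.reverse()
--     return out
-- ===== Notes on version B (the rewrite author's own statement) =====
-- stated objective: alternative
-- what changed: B replaces A's forward budget-consuming accumulator loop by a two-phase reverse algorithm: it sums all token lengths once, then walks the entries from the back keeping the last (total - char_count) characters, slicing the boundary token from its end.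
import Mathlib
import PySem

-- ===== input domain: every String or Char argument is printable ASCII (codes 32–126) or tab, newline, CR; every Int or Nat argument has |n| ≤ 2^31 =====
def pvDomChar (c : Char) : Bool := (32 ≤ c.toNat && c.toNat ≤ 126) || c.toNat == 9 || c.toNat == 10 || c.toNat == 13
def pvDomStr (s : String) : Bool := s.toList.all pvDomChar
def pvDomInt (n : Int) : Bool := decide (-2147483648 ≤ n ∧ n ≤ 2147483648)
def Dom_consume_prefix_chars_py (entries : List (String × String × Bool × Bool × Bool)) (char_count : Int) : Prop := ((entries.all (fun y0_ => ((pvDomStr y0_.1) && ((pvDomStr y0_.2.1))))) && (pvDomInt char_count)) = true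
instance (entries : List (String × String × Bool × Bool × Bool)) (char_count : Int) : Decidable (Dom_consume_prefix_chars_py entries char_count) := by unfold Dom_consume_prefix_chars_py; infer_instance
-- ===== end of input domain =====

-- B works from the BACK: it sums the token lengths once, then keeps the last
-- (total - char_count) characters by walking the entries in reverse and slicing the
-- boundary token from its end; objective: alternative (same cost, different traversal).

-- ===== PORT A =====
-- one iteration of A's for-loop body over the accumulator (remain, out)
def pvStepA (st : Int × List (String × String × Bool × Bool × Bool))
    (e : String × String × Bool × Bool × Bool) : Int × List (String × String × Bool × Bool × Bool) :=
  let remain := st.1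
  let out := st.2
  if remain ≤ 0 then (remain, out ++ [e])
  else
    let token_len : Int := if e.1 == "tab" then 1 else PySem.Str.len e.2.1
    if remain ≥ token_len then (remain - token_len, out)
    else if e.1 == "tab" then (0, out ++ [e])
    else (0, out ++ [(e.1, PySem.Str.slice e.2.1 (some remain) none, e.2.2)])

def consume_prefix_chars_py (entries : List (String × String × Bool × Bool × Bool)) (char_count : Int) : List (String × String × Bool × Bool × Bool) :=
  (entries.foldl pvStepA (max char_count 0, [])).2

-- ===== PORT B =====
-- token length: 1 for "tab", else len(value)
def pvLen (e : String × String × Bool × Bool × Bool) : Int :=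
  if e.1 == "tab" then 1 else PySem.Str.len e.2.1

-- total = sum(1 if t == "tab" else len(v) for ...)
def pvTotal : List (String × String × Bool × Bool × Bool) → Int
  | [] => 0
  | e :: rest => pvLen e + pvTotal rest

-- B's reversed for-loop with break: es is the (reversed) remaining entries,
-- out the appended output (reversed at the end by the caller).
def pvBack : List (String × String × Bool × Bool × Bool) → Int → Int →
    List (String × String × Bool × Bool × Bool) → List (String × String × Bool × Bool × Bool)
  | [], _, _, out => out
  | e :: rest, keep, acc, out =>
    let L := pvLen e
    if acc + L ≤ keep then pvBack rest keep (acc + L) (out ++ [e])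
    else
      let need := keep - acc
      if 0 < need then out ++ [(e.1, PySem.Str.slice e.2.1 (some (L - need)) none, e.2.2)]
      else out

def consume_prefix_chars_py_alt (entries : List (String × String × Bool × Bool × Bool)) (char_count : Int) : List (String × String × Bool × Bool × Bool) :=
  let drop := max char_count 0
  let keep := pvTotal entries - drop
  (pvBack entries.reverse keep 0 []).reverse

-- ===== PRECONDITION & SPEC =====
def Spec_consume_prefix_chars_py (entries : List (String × String × Bool × Bool × Bool)) (char_count : Int) (out : List (String × String × Bool × Bool × Bool)) : Prop := out = consume_prefix_chars_py_alt entries char_count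
instance (entries : List (String × String × Bool × Bool × Bool)) (char_count : Int) (out : List (String × String × Bool × Bool × Bool)) : Decidable (Spec_consume_prefix_chars_py entries char_count out) := by unfold Spec_consume_prefix_chars_py; infer_instance

-- ===== CLAIM (what is proved, stated in full; the proofs are below) =====
def Claim_equal_consume_prefix_chars_py : Prop := ∀ (entries : List (String × String × Bool × Bool × Bool)) (char_count : Int), Dom_consume_prefix_chars_py entries char_count → Spec_consume_prefix_chars_py entries char_count (consume_prefix_chars_py entries char_count)

-- ===== LEMMAS AND PROOFS =====

lemma pvLen_nonneg (e : String × String × Bool × Bool × Bool) : 0 ≤ pvLen e := by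
  unfold pvLen
  split
  · omega
  · simp [PySem.Str.len]

lemma pvLen_tab (e : String × String × Bool × Bool × Bool) (h : e.1 = "tab") : pvLen e = 1 := by
  simp [pvLen, h]

lemma pvLen_word (e : String × String × Bool × Bool × Bool) (h : ¬ e.1 = "tab") :
    pvLen e = (e.2.1.length : Int) := by
  simp [pvLen, h, PySem.Str.len]

-- common specification: cut the list at the boundary entry, front-recursively
def pvFindCut (es : List (String × String × Bool × Bool × Bool)) (remain : Int) : List (String × String × Bool × Bool × Bool) :=
  match es with
  | [] => []
  | e :: rest =>
    if remain = 0 ∨ remain < pvLen e then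
      (if remain = 0 ∨ e.1 = "tab" then e
       else (e.1, PySem.Str.slice e.2.1 (some remain) none, e.2.2)) :: rest
    else pvFindCut rest (remain - pvLen e)

lemma pvFindCut_zero (es : List (String × String × Bool × Bool × Bool)) : pvFindCut es 0 = es := by
  cases es with
  | nil => rfl
  | cons e rest => simp [pvFindCut]

-- A equals the cut specification
lemma pv_main (es : List (String × String × Bool × Bool × Bool)) :
    ∀ (remain : Int) (out : List (String × String × Bool × Bool × Bool)), 0 ≤ remain →
      (es.foldl pvStepA (remain, out)).2 = out ++ pvFindCut es remain := by
  induction es with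
  | nil => intro remain out _; simp [pvFindCut]
  | cons e rest ih =>
    intro remain out hr
    by_cases h0 : remain = 0
    · subst h0
      have hstep : pvStepA (0, out) e = (0, out ++ [e]) := by simp [pvStepA]
      simp [List.foldl, hstep, ih 0 (out ++ [e]) le_rfl, pvFindCut_zero, pvFindCut]
    · have hpos : 0 < remain := by omega
      by_cases htab : e.1 = "tab"
      · have hpl := pvLen_tab e htab
        by_cases hge : (1:Int) ≤ remain
        · have hstep : pvStepA (remain, out) e = (remain - 1, out) := by
            simp [pvStepA, htab, not_le.mpr hpos, hge]
          have hcut : pvFindCut (e :: rest) remain = pvFindCut rest (remain - 1) := by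
            simp [pvFindCut, hpl, h0, show ¬ remain < 1 by omega]
          simp only [List.foldl, hstep, hcut]
          exact ih (remain - 1) out (by omega)
        · omega
      · have hpl := pvLen_word e htab
        by_cases hge : (e.2.1.length : Int) ≤ remain
        · have hstep : pvStepA (remain, out) e = (remain - (e.2.1.length : Int), out) := by
            simp [pvStepA, htab, not_le.mpr hpos, hge, PySem.Str.len]
          have hcut : pvFindCut (e :: rest) remain
              = pvFindCut rest (remain - (e.2.1.length : Int)) := by
            simp [pvFindCut, hpl, h0, show ¬ remain < (e.2.1.length : Int) by omega]
          simp only [List.foldl, hstep, hcut]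
          exact ih _ out (by omega)
        · have hlt : remain < (e.2.1.length : Int) := lt_of_not_ge hge
          have hstep : pvStepA (remain, out) e
              = (0, out ++ [(e.1, PySem.Str.slice e.2.1 (some remain) none, e.2.2)]) := by
            simp [pvStepA, htab, not_le.mpr hpos, not_le.mpr hlt, PySem.Str.len]
          have hcut : pvFindCut (e :: rest) remain
              = (e.1, PySem.Str.slice e.2.1 (some remain) none, e.2.2) :: rest := by
            simp [pvFindCut, hpl, h0, hlt, htab]
          simp [List.foldl, hstep, ih 0 _ le_rfl, pvFindCut_zero, hcut]

lemma pvTotal_nonneg (l : List (String × String × Bool × Bool × Bool)) : 0 ≤ pvTotal l := by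
  induction l with
  | nil => simp [pvTotal]
  | cons e rest ih => have := pvLen_nonneg e; unfold pvTotal; omega

-- the boundary entry as B emits it, given leftover budget k
def pvStepB (e : String × String × Bool × Bool × Bool) (k : Int) : List (String × String × Bool × Bool × Bool) :=
  if pvLen e ≤ k then [e]
  else if 0 < k then [(e.1, PySem.Str.slice e.2.1 (some (pvLen e - k)) none, e.2.2)]
  else []

-- one unfolding step of pvBack in each branch
lemma pvBack_cons_le (e : String × String × Bool × Bool × Bool)
    (rest : List (String × String × Bool × Bool × Bool)) (keep acc : Int)
    (out : List (String × String × Bool × Bool × Bool)) (h : acc + pvLen e ≤ keep) :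
    pvBack (e :: rest) keep acc out = pvBack rest keep (acc + pvLen e) (out ++ [e]) := by
  simp [pvBack, h]

lemma pvBack_cons_gt (e : String × String × Bool × Bool × Bool)
    (rest : List (String × String × Bool × Bool × Bool)) (keep acc : Int)
    (out : List (String × String × Bool × Bool × Bool)) (h : ¬ acc + pvLen e ≤ keep) :
    pvBack (e :: rest) keep acc out =
      if 0 < keep - acc
      then out ++ [(e.1, PySem.Str.slice e.2.1 (some (pvLen e - (keep - acc))) none, e.2.2)]
      else out := by
  by_cases hk : 0 < keep - acc
  · simp [pvBack, h, hk]
  · simp [pvBack, h, hk]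

-- the accumulators factor out of pvBack
lemma pvBack_shift (rs : List (String × String × Bool × Bool × Bool)) :
    ∀ (keep acc : Int) (out : List (String × String × Bool × Bool × Bool)),
      pvBack rs keep acc out = out ++ pvBack rs (keep - acc) 0 [] := by
  induction rs with
  | nil => intro keep acc out; simp [pvBack]
  | cons e rest ih =>
    intro keep acc out
    by_cases h : acc + pvLen e ≤ keep
    · have h' : 0 + pvLen e ≤ keep - acc := by omega
      rw [pvBack_cons_le e rest keep acc out h, pvBack_cons_le e rest (keep - acc) 0 [] h',
        ih keep (acc + pvLen e) (out ++ [e]), ih (keep - acc) (0 + pvLen e) ([] ++ [e])]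
      have : keep - (acc + pvLen e) = keep - acc - (0 + pvLen e) := by ring
      simp [this]
    · have h' : ¬ 0 + pvLen e ≤ keep - acc := by omega
      rw [pvBack_cons_gt e rest keep acc out h, pvBack_cons_gt e rest (keep - acc) 0 [] h']
      have : keep - acc - 0 = keep - acc := by ring
      rw [this]
      split <;> simp

-- sum of token lengths is invariant under append and reverse
lemma pvTotal_append (a b : List (String × String × Bool × Bool × Bool)) :
    pvTotal (a ++ b) = pvTotal a + pvTotal b := by
  induction a with
  | nil => simp [pvTotal]
  | cons e rest ih => simp only [List.cons_append, pvTotal, ih]; ring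

lemma pvTotal_reverse (l : List (String × String × Bool × Bool × Bool)) :
    pvTotal l.reverse = pvTotal l := by
  induction l with
  | nil => rfl
  | cons e rest ih =>
    simp only [List.reverse_cons, pvTotal_append, ih, pvTotal]; ring

-- pvBack on a snoc: the final element is reached iff the budget covers the rest
lemma pvBack_snoc (rs : List (String × String × Bool × Bool × Bool))
    (e : String × String × Bool × Bool × Bool) :
    ∀ (k : Int), pvBack (rs ++ [e]) k 0 []
      = if pvTotal rs ≤ k then rs ++ pvStepB e (k - pvTotal rs) else pvBack rs k 0 [] := by
  induction rs with
  | nil =>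
    intro k
    have h0 : pvTotal ([] : List (String × String × Bool × Bool × Bool)) = 0 := rfl
    by_cases hL : pvLen e ≤ k
    · have hk : (0:Int) ≤ k := le_trans (pvLen_nonneg e) hL
      rw [List.nil_append, pvBack_cons_le e [] k 0 [] (by omega), h0, if_pos hk]
      simp [pvBack, pvStepB, hL]
    · rw [List.nil_append, pvBack_cons_gt e [] k 0 [] (by omega), h0]
      by_cases hk : (0:Int) ≤ k
      · rw [if_pos hk]
        by_cases hp : (0:Int) < k
        · simp [pvStepB, hL, hp]
        · simp [pvStepB, hL, hp]
      · rw [if_neg hk, if_neg (show ¬ (0:Int) < k - 0 by omega)]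
        rfl
  | cons f rest ih =>
    intro k
    have hnn : 0 ≤ pvTotal rest := pvTotal_nonneg rest
    have hcons : pvTotal (f :: rest) = pvLen f + pvTotal rest := rfl
    by_cases h : 0 + pvLen f ≤ k
    · rw [List.cons_append, pvBack_cons_le f (rest ++ [e]) k 0 [] h,
        pvBack_shift (rest ++ [e]) k (0 + pvLen f) ([] ++ [f]), ih (k - (0 + pvLen f))]
      by_cases h2 : pvTotal rest ≤ k - (0 + pvLen f)
      · rw [if_pos h2, if_pos (show pvTotal (f :: rest) ≤ k by omega)]
        have : k - (0 + pvLen f) - pvTotal rest = k - pvTotal (f :: rest) := by rw [hcons]; ring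
        rw [this]; simp
      · rw [if_neg h2, if_neg (show ¬ pvTotal (f :: rest) ≤ k by omega),
          pvBack_cons_le f rest k 0 [] h, pvBack_shift rest k (0 + pvLen f) ([] ++ [f])]
    · rw [if_neg (show ¬ pvTotal (f :: rest) ≤ k by omega), List.cons_append,
        pvBack_cons_gt f (rest ++ [e]) k 0 [] h, pvBack_cons_gt f rest k 0 [] h]

-- B equals the cut specification
lemma pv_back_main (l : List (String × String × Bool × Bool × Bool)) :
    ∀ (r : Int), 0 ≤ r →
      (pvBack l.reverse (pvTotal l - r) 0 []).reverse = pvFindCut l r := by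
  induction l with
  | nil => intro r _; simp [pvBack, pvFindCut]
  | cons e rest ih =>
    intro r hr
    have hL : 0 ≤ pvLen e := pvLen_nonneg e
    have hcons : pvTotal (e :: rest) = pvLen e + pvTotal rest := rfl
    rw [List.reverse_cons, pvBack_snoc rest.reverse e, pvTotal_reverse]
    by_cases hle : r ≤ pvLen e
    · rw [if_pos (show pvTotal rest ≤ pvTotal (e :: rest) - r by omega)]
      have harg : pvTotal (e :: rest) - r - pvTotal rest = pvLen e - r := by rw [hcons]; ring
      rw [harg]
      by_cases h0 : r = 0
      · subst h0
        have hstep : pvStepB e (pvLen e - 0) = [e] := by simp [pvStepB]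
        rw [hstep]
        simp [pvFindCut]
      · by_cases hlt : r < pvLen e
        · have hstep : pvStepB e (pvLen e - r)
              = [(e.1, PySem.Str.slice e.2.1 (some (pvLen e - (pvLen e - r))) none, e.2.2)] := by
            simp [pvStepB, show ¬ r ≤ 0 by omega, hlt]
          have harg2 : pvLen e - (pvLen e - r) = r := by ring
          rw [hstep, harg2]
          have htab : ¬ e.1 = "tab" := by
            intro hteq
            have := pvLen_tab e hteq
            omega
          simp [pvFindCut, h0, hlt, htab]
        · have hstep : pvStepB e (pvLen e - r) = [] := by
            simp [pvStepB, show ¬ r ≤ 0 by omega, hlt]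
          rw [hstep]
          have hfc : pvFindCut (e :: rest) r = pvFindCut rest (r - pvLen e) := by
            simp [pvFindCut, h0, hlt]
          rw [hfc, show r - pvLen e = 0 by omega, pvFindCut_zero]
          simp
    · rw [if_neg (show ¬ pvTotal rest ≤ pvTotal (e :: rest) - r by omega)]
      have harg : pvTotal (e :: rest) - r = pvTotal rest - (r - pvLen e) := by rw [hcons]; ring
      rw [harg, ih (r - pvLen e) (by omega)]
      have hfc : pvFindCut (e :: rest) r = pvFindCut rest (r - pvLen e) := by
        simp [pvFindCut, show ¬ r = 0 by omega, show ¬ r < pvLen e by omega]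
      rw [hfc]

-- ===== VERDICT (by name: the statement is the Claim_ definition above) =====
theorem consume_prefix_chars_py_spec : Claim_equal_consume_prefix_chars_py := by
  intro entries char_count _
  unfold Spec_consume_prefix_chars_py consume_prefix_chars_py consume_prefix_chars_py_alt
  rw [pv_main entries (max char_count 0) [] (le_max_right _ _),
    pv_back_main entries (max char_count 0) (le_max_right _ _)]
  simp
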